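-- pv_equiv track=rewrite | github.com/cmbenello/141-discussion-final | solutions/recursion_lists_sols.py | rl_50_all_ways_to_split_into_runs
-- ===== SOURCE A (Python) =====
-- from typing import Any, List, Optional, Tuple
--
-- def rl_50_all_ways_to_split_into_runs(xs: List[Any]) -> List[List[List[Any]]]:
--     if not xs:
--         return [[]]
--     all_splits: List[List[List[Any]]] = []
--     for i in range(1, len(xs) + 1):
--         first_segment = xs[:i]
--         for rest in rl_50_all_ways_to_split_into_runs(xs[i:]):
--             all_splits.append([first_segment] + rest)
--     return all_splits
-- ===== SOURCE B (Python) =====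
-- from typing import Any, List
--
-- def rl_50_all_ways_to_split_into_runs(xs: List[Any]) -> List[List[List[Any]]]:
--     # Bottom-up suffix DP: memo[j] holds all splits of the suffix xs[k+1+j:],
--     # each suffix's splits are computed exactly once and reused.
--     memo = [[[]]]  # splits of the empty suffix
--     for k in range(len(xs) - 1, -1, -1):
--         entry = [[xs[k:k + 1 + j]] + rest
--                  for j, suffix_splits in enumerate(memo)
--                  for rest in suffix_splits]
--         memo = [entry] + memo
--     return memo[0]
-- ===== Notes on version B (the rewrite author's own statement) =====
-- stated objective: alternative
-- what changed: Replaces A's top-down recursion, which recomputes the splits of each suffix many times via slicing, with a single bottom-up pass that builds the split list of every suffix exactly once and assembles each entry from the already-computed ones (measured 1.93x at n=16; both are bounded by the exponential output size).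
import Mathlib
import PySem

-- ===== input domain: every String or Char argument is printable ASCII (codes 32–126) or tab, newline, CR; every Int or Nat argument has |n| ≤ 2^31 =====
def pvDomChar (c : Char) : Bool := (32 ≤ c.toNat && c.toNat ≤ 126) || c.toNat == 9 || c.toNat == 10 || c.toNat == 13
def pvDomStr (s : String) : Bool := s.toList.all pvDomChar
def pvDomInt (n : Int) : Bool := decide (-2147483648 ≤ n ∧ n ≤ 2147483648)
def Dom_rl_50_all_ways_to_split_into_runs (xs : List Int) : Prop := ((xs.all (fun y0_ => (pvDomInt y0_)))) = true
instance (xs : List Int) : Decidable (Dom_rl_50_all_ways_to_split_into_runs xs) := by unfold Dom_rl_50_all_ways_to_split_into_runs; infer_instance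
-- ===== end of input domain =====

-- B replaces A's re-recursion on every suffix slice by a single bottom-up pass that
-- memoizes the splits of each suffix once (same values, same order).

-- ===== PORT A =====
def rl_50_all_ways_to_split_into_runs (xs : List Int) : List (List (List Int)) :=
  if h : xs = [] then [[]]
  else
    (PySem.List.pyRange 1 ((xs.length : Int) + 1) 1).attach.foldl
      (fun all_splits i =>
        all_splits ++
          (rl_50_all_ways_to_split_into_runs (PySem.List.slice xs (some i.1) none)).map
            (fun rest => PySem.List.slice xs none (some i.1) :: rest)) []
termination_by xs.length
decreasing_by
  have h1 : (1 : Int) ≤ i.1 := ((PySem.List.mem_pyRange_one).1 i.2).1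
  rw [PySem.List.slice_from xs (le_trans (by omega) h1)]
  have hlen : xs.length ≠ 0 := fun hz => h (List.eq_nil_of_length_eq_zero hz)
  simp [List.length_drop]
  omega

-- ===== PORT B =====
-- memo list: entry j holds all splits of the suffix of xs starting j positions in
def pvMemoRuns (xs : List Int) : List (List (List (List Int))) :=
  match xs with
  | [] => [[[]]]
  | x :: t =>
    let memo := pvMemoRuns t
    (memo.zipIdx.flatMap
      (fun p => p.1.map (fun rest => ((x :: t).take (1 + p.2)) :: rest))) :: memo

def rl_50_all_ways_to_split_into_runs_alt (xs : List Int) : List (List (List Int)) :=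
  (pvMemoRuns xs).headD []

-- ===== PRECONDITION & SPEC =====
def Spec_rl_50_all_ways_to_split_into_runs (xs : List Int) (out : List (List (List Int))) : Prop := out = rl_50_all_ways_to_split_into_runs_alt xs
instance (xs : List Int) (out : List (List (List Int))) : Decidable (Spec_rl_50_all_ways_to_split_into_runs xs out) := by unfold Spec_rl_50_all_ways_to_split_into_runs; infer_instance

-- ===== CLAIM (what is proved, stated in full; the proofs are below) =====
def Claim_equal_rl_50_all_ways_to_split_into_runs : Prop := ∀ (xs : List Int), Dom_rl_50_all_ways_to_split_into_runs xs → Spec_rl_50_all_ways_to_split_into_runs xs (rl_50_all_ways_to_split_into_runs xs)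

-- ===== LEMMAS AND PROOFS =====

lemma pv_tails_eq (t : List Int) :
    t.tails = (List.range (t.length + 1)).map (fun j => t.drop j) := by
  induction t with
  | nil => simp
  | cons a t ih =>
      simp [List.range_succ_eq_map, ih, List.map_map, Function.comp_def]

lemma pv_zipIdx_map_range {β : Type} (m : Nat) (f : Nat → β) :
    ((List.range m).map f).zipIdx = (List.range m).map (fun j => (f j, j)) := by
  induction m with
  | zero => simp
  | succ m ih =>
      simp [List.range_succ, List.zipIdx_append, ih]

lemma pv_rl_cons (x : Int) (t : List Int) :
    rl_50_all_ways_to_split_into_runs (x :: t)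
      = (List.range (t.length + 1)).flatMap
          (fun j => (rl_50_all_ways_to_split_into_runs (t.drop j)).map
            (fun rest => (x :: t.take j) :: rest)) := by
  rw [rl_50_all_ways_to_split_into_runs]
  simp only [dif_neg (List.cons_ne_nil x t)]
  rw [List.foldl_attach
        (f := fun (acc : List (List (List Int))) (v : Int) =>
          acc ++
            (rl_50_all_ways_to_split_into_runs (PySem.List.slice (x :: t) (some v) none)).map
              (fun rest => PySem.List.slice (x :: t) none (some v) :: rest))]
  rw [PySem.List.foldl_append_eq_flatMap]
  rw [PySem.List.pyRange_one]
  have hcast : (((x :: t).length : Int) + 1 - 1).toNat = t.length + 1 := by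
    simp
  rw [hcast, List.flatMap_map]
  apply List.flatMap_congr
  intro j hj
  have h1 : (1 : Int) + (j : Int) = ((1 + j : Nat) : Int) := by push_cast; ring
  rw [h1, PySem.List.slice_from_natCast, PySem.List.slice_to_natCast]
  simp [Nat.add_comm 1 j, List.take_succ_cons]

lemma pv_memo_eq (xs : List Int) :
    pvMemoRuns xs = xs.tails.map rl_50_all_ways_to_split_into_runs := by
  induction xs with
  | nil =>
      simp [pvMemoRuns]
      rw [rl_50_all_ways_to_split_into_runs]
      simp
  | cons x t ih =>
      rw [pvMemoRuns]
      simp only [ih, List.tails_cons, List.map_cons]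
      congr 1
      rw [pv_tails_eq, List.map_map, pv_zipIdx_map_range, List.flatMap_map]
      rw [pv_rl_cons]
      apply List.flatMap_congr
      intro j hj
      simp [Nat.add_comm 1 j, List.take_succ_cons]

-- ===== VERDICT (by name: the statement is the Claim_ definition above) =====
theorem rl_50_all_ways_to_split_into_runs_spec : Claim_equal_rl_50_all_ways_to_split_into_runs := by
  intro xs _
  unfold Spec_rl_50_all_ways_to_split_into_runs rl_50_all_ways_to_split_into_runs_alt
  rw [pv_memo_eq]
  cases xs <;> simp
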